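-- pv_equiv track=rewrite | github.com/Tarquinen/school | adventOfCode/day12.py | coordToArrayPos
-- ===== SOURCE A (Python) =====
-- def coordToArrayPos(coord, chart):
--     chartPos = 0
--     for i, element in enumerate(chart):
--         for j in range(len(element)):
--             chartPos += 1
--             if chartPos == coord:
--                 return i, j
--     return 0, 0
-- ===== SOURCE B (Python) =====
-- def coordToArrayPos(coord, chart):
--     total = 0
--     for i, element in enumerate(chart):
--         if total < coord <= total + len(element):
--             return i, coord - total - 1
--         total += len(element)
--     return 0, 0
-- ===== Notes on version B (the rewrite author's own statement) =====
-- stated objective: faster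
-- what changed: Replaced the inner per-cell counting loop with one arithmetic range check per row on a running total of cells seen.
import Mathlib
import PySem

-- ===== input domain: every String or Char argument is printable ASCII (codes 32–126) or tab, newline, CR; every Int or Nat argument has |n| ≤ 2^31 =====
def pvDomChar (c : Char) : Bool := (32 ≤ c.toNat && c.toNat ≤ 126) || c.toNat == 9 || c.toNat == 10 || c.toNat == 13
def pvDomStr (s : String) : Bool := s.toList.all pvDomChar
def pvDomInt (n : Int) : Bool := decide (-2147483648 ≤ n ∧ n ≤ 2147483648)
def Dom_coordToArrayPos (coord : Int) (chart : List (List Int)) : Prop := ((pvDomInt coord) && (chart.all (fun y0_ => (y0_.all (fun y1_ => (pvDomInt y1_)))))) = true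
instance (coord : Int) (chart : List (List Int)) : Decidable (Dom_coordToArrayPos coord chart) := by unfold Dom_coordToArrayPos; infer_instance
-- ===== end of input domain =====

-- ===== PORT A =====
-- B replaces A's inner per-cell counting loop by one arithmetic range check per row (faster).
-- inner loop: for j in range(len(element)): chartPos += 1; if chartPos == coord: return i, j
def coordA_inner (coord i : Int) : Nat → Int → Int → Option (Int × Int) × Int
  | 0, _, chartPos => (none, chartPos)
  | n + 1, j, chartPos =>
      let cp := chartPos + 1
      if cp = coord then (some (i, j), cp) else coordA_inner coord i n (j + 1) cp

-- outer loop: for i, element in enumerate(chart)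
def coordA_outer (coord : Int) : List (List Int) → Int → Int → Int × Int
  | [], _, _ => (0, 0)
  | r :: rest, i, chartPos =>
      match coordA_inner coord i r.length 0 chartPos with
      | (some p, _) => p
      | (none, cp) => coordA_outer coord rest (i + 1) cp

def coordToArrayPos (coord : Int) (chart : List (List Int)) : Int × Int :=
  coordA_outer coord chart 0 0

-- ===== PORT B =====
def coordB_loop (coord : Int) : List (List Int) → Int → Int → Int × Int
  | [], _, _ => (0, 0)
  | r :: rest, i, total =>
      if total < coord ∧ coord ≤ total + r.length then (i, coord - total - 1)
      else coordB_loop coord rest (i + 1) (total + r.length)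

def coordToArrayPos_alt (coord : Int) (chart : List (List Int)) : Int × Int :=
  coordB_loop coord chart 0 0

-- ===== PRECONDITION & SPEC =====
def Spec_coordToArrayPos (coord : Int) (chart : List (List Int)) (out : Int × Int) : Prop := out = coordToArrayPos_alt coord chart
instance (coord : Int) (chart : List (List Int)) (out : Int × Int) : Decidable (Spec_coordToArrayPos coord chart out) := by unfold Spec_coordToArrayPos; infer_instance

-- ===== CLAIM =====
def Claim_equal_coordToArrayPos : Prop := ∀ (coord : Int) (chart : List (List Int)), Dom_coordToArrayPos coord chart → Spec_coordToArrayPos coord chart (coordToArrayPos coord chart)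

-- ===== LEMMAS AND PROOFS =====
theorem coordA_inner_eq (coord i : Int) (n : Nat) :
    ∀ (j c : Int), coordA_inner coord i n j c =
      if c < coord ∧ coord ≤ c + n then (some (i, j + coord - c - 1), coord)
      else (none, c + n) := by
  induction n with
  | zero =>
      intro j c
      simp [coordA_inner]
  | succ n ih =>
      intro j c
      simp only [coordA_inner]
      by_cases h : c + 1 = coord
      · subst h
        rw [if_pos rfl, if_pos ⟨by omega, by omega⟩]
        simp only [Prod.mk.injEq, Option.some.injEq]
        exact ⟨⟨trivial, by ring⟩, trivial⟩
      · rw [if_neg h, ih]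
        split_ifs with h1 h2 h2
        · simp only [Prod.mk.injEq, Option.some.injEq]
          exact ⟨⟨trivial, by ring⟩, trivial⟩
        · exfalso; push_cast at h1 h2; omega
        · exfalso; push_cast at h1 h2; omega
        · simp only [Prod.mk.injEq]
          exact ⟨trivial, by push_cast; ring⟩

theorem coordA_outer_eq (coord : Int) (rows : List (List Int)) :
    ∀ (i c : Int), coordA_outer coord rows i c = coordB_loop coord rows i c := by
  induction rows with
  | nil => intro i c; rfl
  | cons r rest ih =>
      intro i c
      simp only [coordA_outer, coordB_loop, coordA_inner_eq]
      split_ifs with h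
      · simp
      · simp [ih]

-- ===== VERDICT =====
theorem coordToArrayPos_spec : Claim_equal_coordToArrayPos := by
  intro coord chart _
  show _ = _
  unfold coordToArrayPos coordToArrayPos_alt
  exact coordA_outer_eq coord chart 0 0
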